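-- pv_equiv track=rewrite | github.com/shahidagha/linear-equation-solver | backend/normalization/equation_standardizer.py | _split_square
-- ===== SOURCE A (Python) =====
-- def _split_square(n: int) -> tuple[int, int]:
--     if n <= 0:
--         return 0, 1
--
--     outside = 1
--     inside = n
--     factor = 2
--     while factor * factor <= inside:
--         while inside % (factor * factor) == 0:
--             outside *= factor
--             inside //= factor * factor
--         factor += 1
--     return outside, inside
-- ===== SOURCE B (Python) =====
-- def _split_square(n: int) -> tuple[int, int]:
--     if n <= 0:
--         return 0, 1
--
--     # scan all candidates and keep the largest d with d*d dividing n
--     best = 1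
--     d = 1
--     while d * d <= n:
--         if n % (d * d) == 0:
--             best = d
--         d += 1
--     return best, n // (best * best)
-- ===== Notes on version B (the rewrite author's own statement) =====
-- stated objective: alternative
-- what changed: B replaces A's divide-out-each-square-factor loop (which mutates the remaining 'inside' and multiplies an accumulator) by a direct maximum search: scan d = 1..isqrt(n) once, remember the largest d with d*d dividing n, and return (d, n // d**2).
import Mathlib
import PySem

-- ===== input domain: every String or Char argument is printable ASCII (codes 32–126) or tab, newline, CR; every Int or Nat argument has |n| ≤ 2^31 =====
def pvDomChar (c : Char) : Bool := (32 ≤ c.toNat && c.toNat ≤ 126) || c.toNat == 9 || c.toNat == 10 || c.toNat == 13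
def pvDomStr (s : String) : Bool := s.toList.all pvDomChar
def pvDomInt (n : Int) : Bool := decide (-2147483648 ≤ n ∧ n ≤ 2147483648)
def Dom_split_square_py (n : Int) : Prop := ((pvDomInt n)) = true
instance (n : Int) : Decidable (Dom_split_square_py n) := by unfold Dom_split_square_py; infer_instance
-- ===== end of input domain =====

-- B replaces A's divide-out-square-factors loop by a direct scan for the largest d with d*d ∣ n;
-- same asymptotic cost (alternative algorithm, not claimed faster).

-- ===== PORT A =====
-- termination facts for the loops (cited by decreasing_by; kept tiny so the loop bodies stay small)
theorem pv_inner_dec (f inside : Int) (hf : 2 ≤ f) (hi : 1 ≤ inside)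
    (hm : PySem.Int.mod inside (f * f) = 0) :
    (PySem.Int.floordiv inside (f * f)).toNat < inside.toNat := by
  have hb : (0:Int) < f * f := by nlinarith
  have hdvd : f * f ∣ inside := (PySem.Int.mod_eq_zero_iff_dvd inside (f * f)).mp hm
  have hq : PySem.Int.floordiv inside (f * f) * (f * f) = inside := by
    rw [PySem.Int.floordiv_eq_ediv_of_pos hb]
    exact Int.ediv_mul_cancel hdvd
  have h2 : (0:Int) ≤ PySem.Int.floordiv inside (f * f) := by nlinarith
  have h1 : PySem.Int.floordiv inside (f * f) < inside := by nlinarith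
  omega
-- inner 'while inside % (factor*factor) == 0' loop; the '2 ≤ f ∧ 1 ≤ inside' conjuncts are
-- totality guards only (they always hold on states reachable from split_square_py).
def split_square_inner (f outside inside : Int) : Int × Int :=
  if h : 2 ≤ f ∧ 1 ≤ inside ∧ PySem.Int.mod inside (f * f) = 0 then
    split_square_inner f (outside * f) (PySem.Int.floordiv inside (f * f))
  else (outside, inside)
termination_by inside.toNat
decreasing_by exact pv_inner_dec f inside h.1 h.2.1 h.2.2

-- bounds on the inner loop's remaining 'inside', needed for the outer loop's termination
theorem split_square_inner_snd_bounds (f outside inside : Int) :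
    2 ≤ f → 1 ≤ inside →
    1 ≤ (split_square_inner f outside inside).2 ∧
      (split_square_inner f outside inside).2 ≤ inside := by
  induction outside, inside using split_square_inner.induct f with
  | case1 o i h ih =>
    intro hf hi
    obtain ⟨hf2, hi2, hm⟩ := h
    have hb : (0:Int) < f * f := by nlinarith
    have hdvd : f * f ∣ i := (PySem.Int.mod_eq_zero_iff_dvd i (f * f)).mp hm
    have hq : PySem.Int.floordiv i (f * f) * (f * f) = i := by
      rw [PySem.Int.floordiv_eq_ediv_of_pos hb]
      exact Int.ediv_mul_cancel hdvd
    have hq1 : 1 ≤ PySem.Int.floordiv i (f * f) := by nlinarith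
    have hqle : PySem.Int.floordiv i (f * f) ≤ i := by nlinarith
    rw [split_square_inner, dif_pos ⟨hf2, hi2, hm⟩]
    have := ih hf2 hq1
    exact ⟨this.1, le_trans this.2 hqle⟩
  | case2 o i h =>
    intro hf hi
    rw [split_square_inner, dif_neg h]
    exact ⟨hi, le_rfl⟩

-- termination fact for the outer loop (cited by decreasing_by)
theorem pv_outer_dec (f outside inside : Int) (hf : 2 ≤ f) (hi : 1 ≤ inside)
    (hc : f * f ≤ inside) :
    ((split_square_inner f outside inside).2 + 2 - (f + 1)).toNat < (inside + 2 - f).toNat := by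
  obtain ⟨h1, h2⟩ := split_square_inner_snd_bounds f outside inside hf hi
  have hfi : f ≤ inside := by nlinarith
  omega

-- outer 'while factor * factor <= inside' loop; again '2 ≤ f ∧ 1 ≤ inside' are totality guards
def split_square_outer (f outside inside : Int) : Int × Int :=
  if h : 2 ≤ f ∧ 1 ≤ inside ∧ f * f ≤ inside then
    split_square_outer (f + 1) (split_square_inner f outside inside).1
      (split_square_inner f outside inside).2
  else (outside, inside)
termination_by (inside + 2 - f).toNat
decreasing_by exact pv_outer_dec f outside inside h.1 h.2.1 h.2.2

def split_square_py (n : Int) : Int × Int :=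
  if n ≤ 0 then (0, 1) else split_square_outer 2 1 n

-- ===== PORT B =====
-- termination fact for B's scan (cited by decreasing_by)
theorem pv_scan_dec (n d : Int) (hd : 1 ≤ d) (hc : d * d ≤ n) :
    (n + 1 - (d + 1) * (d + 1)).toNat < (n + 1 - d * d).toNat := by
  have he : (d + 1) * (d + 1) = d * d + 2 * d + 1 := by ring
  rw [he]
  generalize d * d = k at *
  omega

-- scan d = 1,2,… while d*d ≤ n, remembering the largest d with d*d ∣ n ('1 ≤ d' is a totality guard)
def best_square_scan (n d best : Int) : Int :=
  if h : 1 ≤ d ∧ d * d ≤ n then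
    best_square_scan n (d + 1) (if PySem.Int.mod n (d * d) = 0 then d else best)
  else best
termination_by (n + 1 - d * d).toNat
decreasing_by exact pv_scan_dec n d h.1 h.2

def split_square_py_alt (n : Int) : Int × Int :=
  if n ≤ 0 then (0, 1)
  else
    let best := best_square_scan n 1 1
    (best, PySem.Int.floordiv n (best * best))

-- ===== PRECONDITION & SPEC =====
def Spec_split_square_py (n : Int) (out : Int × Int) : Prop := out = split_square_py_alt n
instance (n : Int) (out : Int × Int) : Decidable (Spec_split_square_py n out) := by unfold Spec_split_square_py; infer_instance

-- ===== CLAIM (what is proved, stated in full; the proofs are below) =====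
def Claim_equal_split_square_py : Prop := ∀ (n : Int), Dom_split_square_py n → Spec_split_square_py n (split_square_py n)

-- ===== LEMMAS AND PROOFS =====

-- A's inner loop: result (O, I) keeps O*O*I invariant, I divides the input, and f*f no longer divides I
theorem split_square_inner_spec (f o i : Int) :
    2 ≤ f → 1 ≤ o → 1 ≤ i →
    1 ≤ (split_square_inner f o i).1 ∧ 1 ≤ (split_square_inner f o i).2 ∧
      (split_square_inner f o i).1 * (split_square_inner f o i).1 * (split_square_inner f o i).2
        = o * o * i ∧
      ¬ (f * f ∣ (split_square_inner f o i).2) ∧ (split_square_inner f o i).2 ∣ i := by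
  induction o, i using split_square_inner.induct f with
  | case1 o i h ih =>
    intro hf ho hi
    obtain ⟨hf2, hi2, hm⟩ := h
    have hb : (0:Int) < f * f := by nlinarith
    have hdvd : f * f ∣ i := (PySem.Int.mod_eq_zero_iff_dvd i (f * f)).mp hm
    have hq : PySem.Int.floordiv i (f * f) * (f * f) = i := by
      rw [PySem.Int.floordiv_eq_ediv_of_pos hb]
      exact Int.ediv_mul_cancel hdvd
    have hq1 : 1 ≤ PySem.Int.floordiv i (f * f) := by nlinarith
    have ho' : 1 ≤ o * f := by nlinarith
    obtain ⟨H1, H2, H3, H4, H5⟩ := ih hf2 ho' hq1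
    rw [split_square_inner, dif_pos ⟨hf2, hi2, hm⟩]
    refine ⟨H1, H2, ?_, H4, H5.trans ⟨f * f, by linarith [hq]⟩⟩
    rw [H3]; nlinarith [hq]
  | case2 o i h =>
    intro hf ho hi
    have hm : ¬ PySem.Int.mod i (f * f) = 0 := by
      intro hmm; exact h ⟨hf, hi, hmm⟩
    rw [split_square_inner, dif_neg h]
    refine ⟨ho, hi, rfl, ?_, dvd_refl i⟩
    intro hd
    exact hm ((PySem.Int.mod_eq_zero_iff_dvd i (f * f)).mpr hd)

-- A's outer loop: result (O, I) with O*O*I = o*o*i, both positive, and I squarefree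
theorem split_square_outer_spec (f o i : Int) :
    2 ≤ f → 1 ≤ o → 1 ≤ i →
    (∀ g, 2 ≤ g → g < f → ¬ (g * g ∣ i)) →
    1 ≤ (split_square_outer f o i).1 ∧ 1 ≤ (split_square_outer f o i).2 ∧
      (split_square_outer f o i).1 * (split_square_outer f o i).1 * (split_square_outer f o i).2
        = o * o * i ∧
      ∀ g, 2 ≤ g → ¬ (g * g ∣ (split_square_outer f o i).2) := by
  induction f, o, i using split_square_outer.induct with
  | case1 f o i h ih =>
    intro hf ho hi hinv
    obtain ⟨hf2, hi2, hc⟩ := h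
    obtain ⟨I1, I2, I3, I4, I5⟩ := split_square_inner_spec f o i hf2 ho hi2
    have hinv' : ∀ g, 2 ≤ g → g < f + 1 → ¬ (g * g ∣ (split_square_inner f o i).2) := by
      intro g hg2 hgf hgd
      rcases lt_or_ge g f with hlt | hge
      · exact hinv g hg2 hlt (hgd.trans I5)
      · have : g = f := by omega
        exact I4 (this ▸ hgd)
    obtain ⟨H1, H2, H3, H4⟩ := ih (by omega) I1 I2 hinv'
    rw [split_square_outer, dif_pos ⟨hf2, hi2, hc⟩]
    exact ⟨H1, H2, by rw [H3, I3], H4⟩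
  | case2 f o i h =>
    intro hf ho hi hinv
    rw [split_square_outer, dif_neg h]
    have hc : ¬ (f * f ≤ i) := by
      intro hcc; exact h ⟨hf, hi, hcc⟩
    refine ⟨ho, hi, rfl, ?_⟩
    intro g hg2 hgd
    rcases lt_or_ge g f with hlt | hge
    · exact hinv g hg2 hlt hgd
    · have hgg : f * f ≤ g * g := by nlinarith
      have : g * g ≤ i := Int.le_of_dvd (by omega) hgd
      omega

-- B's scan: result B is positive, B*B ∣ n, and no larger e has e*e ∣ n
theorem best_square_scan_spec (n d best : Int) :
    1 ≤ n → 1 ≤ d → 1 ≤ best → best * best ∣ n →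
    (∀ e, best < e → e < d → ¬ (e * e ∣ n)) →
    1 ≤ best_square_scan n d best ∧ best_square_scan n d best * best_square_scan n d best ∣ n ∧
      ∀ e, best_square_scan n d best < e → ¬ (e * e ∣ n) := by
  induction d, best using best_square_scan.induct n with
  | case1 d best h ih =>
    intro hn hd hb hdvd hmax
    obtain ⟨hd1, hc⟩ := h
    rw [best_square_scan, dif_pos ⟨hd1, hc⟩]
    by_cases hm : PySem.Int.mod n (d * d) = 0
    · simp only [hm, if_true, dif_pos] at ih ⊢
      exact ih hn (by omega) hd1 ((PySem.Int.mod_eq_zero_iff_dvd n (d * d)).mp hm)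
        (fun e he1 he2 _ => by omega)
    · simp only [hm, if_false, dif_neg, not_false_iff] at ih ⊢
      refine ih hn (by omega) hb hdvd ?_
      intro e he1 he2 hed
      rcases lt_or_ge e d with hlt | hge
      · exact hmax e he1 hlt hed
      · have : e = d := by omega
        exact hm ((PySem.Int.mod_eq_zero_iff_dvd n (d * d)).mpr (this ▸ hed))
  | case2 d best h =>
    intro hn hd hb hdvd hmax
    rw [best_square_scan, dif_neg h]
    have hc : ¬ (d * d ≤ n) := by
      intro hcc; exact h ⟨hd, hcc⟩
    refine ⟨hb, hdvd, ?_⟩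
    intro e he hed
    rcases lt_or_ge e d with hlt | hge
    · exact hmax e he hlt hed
    · have hee : d * d ≤ e * e := by nlinarith
      have : e * e ≤ n := Int.le_of_dvd (by omega) hed
      omega

-- uniqueness core (over ℕ): if i is squarefree and b² ∣ o²·i then b ∣ o
theorem dvd_of_sq_dvd_sq_mul_squarefree (o i b : Nat) (ho : o ≠ 0) (hb : b ≠ 0)
    (hi : Squarefree i) (hd : b * b ∣ o * o * i) : b ∣ o := by
  have hi0 : i ≠ 0 := hi.ne_zero
  rw [← Nat.factorization_le_iff_dvd hb ho]
  have hle : (b * b).factorization ≤ (o * o * i).factorization :=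
    (Nat.factorization_le_iff_dvd (by positivity) (by positivity)).mpr hd
  intro p
  have h1 := hle p
  rw [Nat.factorization_mul hb hb, Nat.factorization_mul (by positivity) hi0,
    Nat.factorization_mul ho ho] at h1
  simp only [Finsupp.add_apply] at h1
  have h2 : i.factorization p ≤ 1 :=
    (Nat.squarefree_iff_factorization_le_one hi0).mp hi p
  omega

-- the Int-level bridge: positive O with O²·I = n, I squarefree ⇒ O is THE largest b with b² ∣ n
theorem largest_eq (n O I B : Int) (hn : 1 ≤ n) (hO : 1 ≤ O) (hI : 1 ≤ I)
    (hprod : O * O * I = n) (hsf : ∀ g, 2 ≤ g → ¬ (g * g ∣ I))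
    (hB : 1 ≤ B) (hBd : B * B ∣ n) (hBmax : ∀ e, B < e → ¬ (e * e ∣ n)) : B = O := by
  have hOd : O * O ∣ n := ⟨I, by linarith [hprod]⟩
  have hOB : O ≤ B := by
    by_contra hc
    exact hBmax O (by omega) hOd
  -- now show B ∣ O via ℕ factorizations
  have hsfN : Squarefree I.toNat := by
    rw [Nat.squarefree_iff_prime_squarefree]
    intro p hp hpd
    have h2 : 2 ≤ (p : Int) := by exact_mod_cast hp.two_le
    refine hsf (p : Int) h2 ?_
    have : ((p * p : Nat) : Int) ∣ ((I.toNat : Nat) : Int) := Int.natCast_dvd_natCast.mpr hpd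
    rwa [Int.toNat_of_nonneg (by omega), Nat.cast_mul] at this
  have hdN : B.toNat * B.toNat ∣ O.toNat * O.toNat * I.toNat := by
    rw [← Int.natCast_dvd_natCast]
    push_cast
    rw [Int.toNat_of_nonneg (by omega : (0:Int) ≤ B),
      Int.toNat_of_nonneg (by omega : (0:Int) ≤ O),
      Int.toNat_of_nonneg (by omega : (0:Int) ≤ I)]
    rw [hprod]; exact hBd
  have hBO : B.toNat ∣ O.toNat :=
    dvd_of_sq_dvd_sq_mul_squarefree O.toNat I.toNat B.toNat (by omega) (by omega) hsfN hdN
  have hBOI : B ∣ O := by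
    have := Int.natCast_dvd_natCast.mpr hBO
    rwa [Int.toNat_of_nonneg (by omega : (0:Int) ≤ B),
      Int.toNat_of_nonneg (by omega : (0:Int) ≤ O)] at this
  have : B ≤ O := Int.le_of_dvd (by omega) hBOI
  omega

-- ===== VERDICT (by name: the statement is the Claim_ definition above) =====
theorem split_square_py_spec : Claim_equal_split_square_py := by
  intro n _
  unfold Spec_split_square_py split_square_py split_square_py_alt
  by_cases hn : n ≤ 0
  · simp [hn]
  · have hn1 : 1 ≤ n := by omega
    simp only [if_neg hn]
    obtain ⟨H1, H2, H3, H4⟩ :=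
      split_square_outer_spec 2 1 n (by omega) (by omega) hn1 (by intro g hg2 hgf; omega)
    obtain ⟨B1, B2, B3⟩ :=
      best_square_scan_spec n 1 1 hn1 (by omega) (by omega) (by simp) (by intro e he1 he2; omega)

    have hOB : best_square_scan n 1 1 = (split_square_outer 2 1 n).1 :=
      largest_eq n (split_square_outer 2 1 n).1 (split_square_outer 2 1 n).2
        (best_square_scan n 1 1) hn1 H1 H2 (by linarith [H3]) H4 B1 B2 B3
    have hprod : (split_square_outer 2 1 n).1 * (split_square_outer 2 1 n).1 *
        (split_square_outer 2 1 n).2 = n := by linarith [H3]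
    have hpos : (0:Int) < (split_square_outer 2 1 n).1 * (split_square_outer 2 1 n).1 := by
      nlinarith
    have hfd : PySem.Int.floordiv n
        (best_square_scan n 1 1 * best_square_scan n 1 1) = (split_square_outer 2 1 n).2 := by
      rw [hOB, PySem.Int.floordiv_eq_ediv_of_pos hpos]
      exact Int.ediv_eq_of_eq_mul_left (by nlinarith) (by linarith [hprod])
    rw [Prod.ext_iff]
    exact ⟨hOB.symm, hfd.symm⟩
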